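-- pv_equiv track=rewrite | github.com/neilharia7/College-Notes | Codes/depth_first_search.py | dfs
-- ===== SOURCE A (Python) =====
-- romania_map = {
--     'Oradea': ['Zerind', 'Sibiu'],
--     'Zerind': ['Arad', 'Oradea'],
--     'Arad': ['Timisoara', 'Sibiu', 'Zerind'],
--     'Timisoara': ['Arad', 'Lugoj'],
--     'Lugoj': ['Mehadia', 'Timisoara'],
--     'Mehadia': ['Drobeta', 'Lugoj'],
--     'Drobeta': ['Mehadia', 'Craiova'],
--     'Craiova': ['Drobeta', 'Rimnicu Vilcea', 'Pitesti'],
--     'Rimnicu Vilcea': ['Sibiu', 'Craiova', 'Pitesti'],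
--     'Sibiu': ['Oradea', 'Arad', 'Fagaras', 'Rimnicu Vilcea'],
--     'Fagaras': ['Sibiu', 'Bucharest'],
--     'Pitesti': ['Rimnicu Vilcea', 'Craiova', 'Bucharest'],
--     'Bucharest': ['Fagaras', 'Pitesti', 'Giurgiu', 'Urziceni'],
--     'Giurgiu': ['Bucharest'],
--     'Urziceni': ['Vaslui', 'Bucharest', 'Hirsova'],
--     'Hirsova': ['Urziceni', 'Eforie'],
--     'Eforie': ['Hirsova'],
--     'Vaslui': ['Iasi', 'Urziceni'],
--     'Iasi': ['Vaslui', 'Neamt'],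
--     'Neamt': ['Iasi']
-- }
--
-- def dfs(start_city, goal_city):
--     """
--
--     :param start_city: the starting city
--     :param goal_city: the city where we want to reach
--
--     :return: path from start_city city to goal_city city or None if no path found
--     """
--
--     # to keep track of the visited nodes
--     visited = set(start_city)
--
--     # to keep track of the paths to explore
--     stack = [[start_city]]
--
--     while stack:
--         # pop the last path
--         path = stack.pop()
--         city = path[-1]
--
--         # check if the current city is the goal_city city
--         if city == goal_city:
--             return path
--
--         if city not in visited:
--             # mark the city as visited by adding it to the visited set
--             visited.add(city)
--
--             # add the next possible cities to the stack by exploring the neighbor cities of the current city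
--             for neighbor_city in romania_map[city]:
--                 new_path = path + [neighbor_city]
--                 stack.append(new_path)
--
--     # if no path is found
--     return None
-- ===== SOURCE B (Python) =====
-- romania_map = {
--     'Oradea': ['Zerind', 'Sibiu'],
--     'Zerind': ['Arad', 'Oradea'],
--     'Arad': ['Timisoara', 'Sibiu', 'Zerind'],
--     'Timisoara': ['Arad', 'Lugoj'],
--     'Lugoj': ['Mehadia', 'Timisoara'],
--     'Mehadia': ['Drobeta', 'Lugoj'],
--     'Drobeta': ['Mehadia', 'Craiova'],
--     'Craiova': ['Drobeta', 'Rimnicu Vilcea', 'Pitesti'],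
--     'Rimnicu Vilcea': ['Sibiu', 'Craiova', 'Pitesti'],
--     'Sibiu': ['Oradea', 'Arad', 'Fagaras', 'Rimnicu Vilcea'],
--     'Fagaras': ['Sibiu', 'Bucharest'],
--     'Pitesti': ['Rimnicu Vilcea', 'Craiova', 'Bucharest'],
--     'Bucharest': ['Fagaras', 'Pitesti', 'Giurgiu', 'Urziceni'],
--     'Giurgiu': ['Bucharest'],
--     'Urziceni': ['Vaslui', 'Bucharest', 'Hirsova'],
--     'Hirsova': ['Urziceni', 'Eforie'],
--     'Eforie': ['Hirsova'],
--     'Vaslui': ['Iasi', 'Urziceni'],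
--     'Iasi': ['Vaslui', 'Neamt'],
--     'Neamt': ['Iasi']
-- }
--
-- def dfs(start_city, goal_city):
--     # Recursive DFS: same search order as the stack version (LIFO = reversed
--     # neighbor order), goal checked before the visited test.
--     visited = set(start_city)
--
--     def explore(path):
--         city = path[-1]
--         if city == goal_city:
--             return path
--         if city not in visited:
--             visited.add(city)
--             for neighbor_city in reversed(romania_map[city]):
--                 result = explore(path + [neighbor_city])
--                 if result is not None:
--                     return result
--         return None
--
--     return explore([start_city])
-- ===== Notes on version B (the rewrite author's own statement) =====
-- stated objective: alternative
-- what changed: Replaces the iterative explicit-stack worklist loop with a recursive DFS helper that threads the shared visited set and tries neighbors in reversed order (the stack's LIFO pop order), returning the first non-None recursive result.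
import Mathlib
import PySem

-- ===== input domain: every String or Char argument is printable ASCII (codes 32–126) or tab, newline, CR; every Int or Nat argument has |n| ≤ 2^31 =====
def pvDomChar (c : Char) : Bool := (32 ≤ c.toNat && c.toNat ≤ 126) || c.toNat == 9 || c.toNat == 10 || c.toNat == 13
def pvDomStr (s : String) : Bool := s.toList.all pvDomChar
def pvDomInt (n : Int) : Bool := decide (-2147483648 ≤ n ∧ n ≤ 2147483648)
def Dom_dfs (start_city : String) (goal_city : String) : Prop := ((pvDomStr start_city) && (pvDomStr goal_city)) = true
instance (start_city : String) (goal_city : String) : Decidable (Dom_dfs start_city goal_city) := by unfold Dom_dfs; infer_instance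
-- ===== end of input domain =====

-- B rewrites the explicit-stack DFS as a recursive DFS (goal checked before the visited test,
-- neighbors explored in reversed order = the stack's LIFO pop order); same search order, same result.

-- ===== PORT A =====
-- the module-level romania_map dict, shared by both ports
def romaniaMap : PySem.Dict String (List String) := PySem.Dict.ofList [
  ("Oradea", ["Zerind", "Sibiu"]),
  ("Zerind", ["Arad", "Oradea"]),
  ("Arad", ["Timisoara", "Sibiu", "Zerind"]),
  ("Timisoara", ["Arad", "Lugoj"]),
  ("Lugoj", ["Mehadia", "Timisoara"]),
  ("Mehadia", ["Drobeta", "Lugoj"]),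
  ("Drobeta", ["Mehadia", "Craiova"]),
  ("Craiova", ["Drobeta", "Rimnicu Vilcea", "Pitesti"]),
  ("Rimnicu Vilcea", ["Sibiu", "Craiova", "Pitesti"]),
  ("Sibiu", ["Oradea", "Arad", "Fagaras", "Rimnicu Vilcea"]),
  ("Fagaras", ["Sibiu", "Bucharest"]),
  ("Pitesti", ["Rimnicu Vilcea", "Craiova", "Bucharest"]),
  ("Bucharest", ["Fagaras", "Pitesti", "Giurgiu", "Urziceni"]),
  ("Giurgiu", ["Bucharest"]),
  ("Urziceni", ["Vaslui", "Bucharest", "Hirsova"]),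
  ("Hirsova", ["Urziceni", "Eforie"]),
  ("Eforie", ["Hirsova"]),
  ("Vaslui", ["Iasi", "Urziceni"]),
  ("Iasi", ["Vaslui", "Neamt"]),
  ("Neamt", ["Iasi"])]

-- the keys of romania_map (used only by Pre_dfs and the proofs)
def romaniaKeys : List String := ["Oradea","Zerind","Arad","Timisoara","Lugoj","Mehadia","Drobeta","Craiova","Rimnicu Vilcea","Sibiu","Fagaras","Pitesti","Bucharest","Giurgiu","Urziceni","Hirsova","Eforie","Vaslui","Iasi","Neamt"]

-- the `while stack:` loop of A; fuel is a totality guard only (never exhausted on Pre_dfs inputs);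
-- the `none` on a failed dict lookup is Python's KeyError, excluded by Pre_dfs
def dfsLoop (goal : String) (fuel : Nat) (stack : List (List String)) (visited : PySem.Set String) : Option (List String) :=
  match fuel with
  | 0 => none
  | fuel + 1 =>
    match PySem.List.pop? stack (-1) with        -- path = stack.pop(); loop ends when stack is empty
    | none => none
    | some (path, rest) =>
      match PySem.List.pyGet? path (-1) with     -- city = path[-1] (paths are never empty)
      | none => none
      | some city =>
        if city == goal then some path
        else if PySem.Set.contains visited city then dfsLoop goal fuel rest visited
        else
          match PySem.Dict.get? romaniaMap city with
          | none => none                         -- KeyError (outside Pre_dfs)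
          | some neighbors =>
            dfsLoop goal fuel (rest ++ neighbors.map (fun n => path ++ [n])) (PySem.Set.add visited city)

def dfs (start_city : String) (goal_city : String) : Option (List String) :=
  -- visited = set(start_city): the set of the CHARACTERS of start_city, as 1-char strings
  dfsLoop goal_city 1000 [[start_city]] (PySem.Set.ofList (start_city.toList.map (fun c => String.singleton c)))

-- ===== PORT B =====
-- explore(path) of B; the for-loop with early return is a foldl whose accumulator short-circuits
-- once a result is found; visited (mutated across calls) is threaded as the second component
def exploreB (goal : String) (fuel : Nat) (visited : PySem.Set String) (path : List String) : Option (List String) × PySem.Set String :=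
  match fuel with
  | 0 => (none, visited)
  | fuel + 1 =>
    match PySem.List.pyGet? path (-1) with       -- city = path[-1]
    | none => (none, visited)
    | some city =>
      if city == goal then (some path, visited)
      else if PySem.Set.contains visited city then (none, visited)
      else
        match PySem.Dict.get? romaniaMap city with
        | none => (none, PySem.Set.add visited city)   -- KeyError (outside Pre_dfs)
        | some neighbors =>
          neighbors.reverse.foldl
            (fun acc n =>
              match acc with
              | (some r, v) => (some r, v)
              | (none, v) => exploreB goal fuel v (path ++ [n]))
            (none, PySem.Set.add visited city)

def dfs_alt (start_city : String) (goal_city : String) : Option (List String) :=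
  (exploreB goal_city 1000 (PySem.Set.ofList (start_city.toList.map (fun c => String.singleton c))) [start_city]).1

-- ===== PRECONDITION & SPEC =====
-- Pre_dfs excludes exactly the inputs on which A raises KeyError: a start city that is not a key of
-- romania_map, unless it equals the goal (returned at once) or is a single character (then it is in
-- set(start_city) and is never expanded).
def Pre_dfs (start_city : String) (goal_city : String) : Prop :=
  start_city = goal_city ∨ start_city ∈ romaniaKeys ∨ start_city.toList.length = 1
instance (start_city : String) (goal_city : String) : Decidable (Pre_dfs start_city goal_city) := by unfold Pre_dfs; infer_instance

def pvWitness_dfs : String × String := ("Arad", "Bucharest")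

def Spec_dfs (start_city : String) (goal_city : String) (out : Option (List String)) : Prop := out = dfs_alt start_city goal_city
instance (start_city : String) (goal_city : String) (out : Option (List String)) : Decidable (Spec_dfs start_city goal_city out) := by unfold Spec_dfs; infer_instance

-- ===== CLAIM (what is proved, stated in full; the proofs are below) =====
def Claim_equal_dfs : Prop := ∀ (start_city : String) (goal_city : String), Dom_dfs start_city goal_city → Pre_dfs start_city goal_city → Spec_dfs start_city goal_city (dfs start_city goal_city)

-- ===== LEMMAS AND PROOFS =====

-- every key maps to a neighbor list whose members are again keys
theorem keysClosed : romaniaKeys.all (fun c =>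
    match PySem.Dict.get? romaniaMap c with
    | some ns => ns.all (fun n => decide (n ∈ romaniaKeys))
    | none => false) = true := by decide

theorem get?_of_key {c : String} (hc : c ∈ romaniaKeys) :
    ∃ ns, PySem.Dict.get? romaniaMap c = some ns ∧ ∀ n ∈ ns, n ∈ romaniaKeys := by
  have h := List.all_eq_true.mp keysClosed c hc
  cases hget : PySem.Dict.get? romaniaMap c with
  | none => rw [hget] at h; exact absurd h (by simp)
  | some ns =>
    refine ⟨ns, rfl, fun n hn => ?_⟩
    rw [hget] at h
    simpa using List.all_eq_true.mp h n hn

-- one pop of [[s]] from the singleton stack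
theorem pop_singleton (s : String) :
    PySem.List.pop? [[s]] (-1) = some ([s], ([] : List (List String))) :=
  PySem.List.pop?_last [] [s]

-- start = goal: both return [start] at once
theorem dfs_self (s : String) (v : PySem.Set String) (fuel : Nat) :
    dfsLoop s (fuel + 1) [[s]] v = some [s] := by
  rw [dfsLoop, pop_singleton]
  simp [PySem.List.pyGet?_neg_one]

theorem exploreB_self (s : String) (v : PySem.Set String) (fuel : Nat) :
    exploreB s (fuel + 1) v [s] = (some [s], v) := by
  rw [exploreB, PySem.List.pyGet?_neg_one]
  simp

-- single-character start ≠ goal: the start is already visited, nothing is expanded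
theorem dfs_stuck (g s : String) (v : PySem.Set String) (fuel : Nat)
    (hbeq : (s == g) = false) (hmem : PySem.Set.contains v s = true) :
    dfsLoop g (fuel + 2) [[s]] v = none := by
  rw [show fuel + 2 = (fuel + 1) + 1 from rfl, dfsLoop, pop_singleton]
  simp only [PySem.List.pyGet?_neg_one, List.getLast?_singleton, hbeq, Bool.false_eq_true, if_false]
  rw [if_pos hmem]
  rfl

theorem exploreB_stuck (g s : String) (v : PySem.Set String) (fuel : Nat)
    (hbeq : (s == g) = false) (hmem : PySem.Set.contains v s = true) :
    exploreB g (fuel + 1) v [s] = (none, v) := by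
  have hmem' : s ∈ v := (PySem.Set.contains_iff v s).mp hmem
  rw [exploreB, PySem.List.pyGet?_neg_one]
  simp [hbeq, hmem']

-- A returns none whenever the goal never matches a popped city (all of them being keys)
theorem loopA_none (goal : String) (hg : goal ∉ romaniaKeys) :
    ∀ (fuel : Nat) (stack : List (List String)) (visited : PySem.Set String),
      (∀ p ∈ stack, ∃ c, p.getLast? = some c ∧ c ∈ romaniaKeys) →
      dfsLoop goal fuel stack visited = none := by
  intro fuel
  induction fuel with
  | zero => intro stack visited _; rfl
  | succ fuel ih =>
    intro stack visited hinv
    rcases List.eq_nil_or_concat stack with rfl | ⟨rest, path, rfl⟩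
    · rfl
    · rw [List.concat_eq_append] at hinv ⊢
      obtain ⟨c, hc, hck⟩ := hinv path (by simp)
      have hcg : (c == goal) = false := beq_false_of_ne (fun h => hg (h ▸ hck))
      rw [dfsLoop, PySem.List.pop?_last]
      simp only [PySem.List.pyGet?_neg_one, hc, hcg, Bool.false_eq_true, if_false]
      by_cases hv : PySem.Set.contains visited c = true
      · rw [hv, if_pos rfl]
        exact ih rest visited (fun p hp => hinv p (by simp [hp]))
      · rw [Bool.not_eq_true] at hv
        rw [hv]
        simp only [Bool.false_eq_true, if_false]
        obtain ⟨ns, hns, hnk⟩ := get?_of_key hck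
        rw [hns]
        refine ih _ _ (fun p hp => ?_)
        rcases List.mem_append.mp hp with h | h
        · exact hinv p (by simp [h])
        · obtain ⟨n, hn, rfl⟩ := List.mem_map.mp h
          exact ⟨n, List.getLast?_concat, hnk n hn⟩

-- B returns none in the same situation
theorem exploreB_none (goal : String) (hg : goal ∉ romaniaKeys) :
    ∀ (fuel : Nat) (visited : PySem.Set String) (path : List String) (c : String),
      path.getLast? = some c → c ∈ romaniaKeys →
      (exploreB goal fuel visited path).1 = none := by
  intro fuel
  induction fuel with
  | zero => intro visited path c _ _; rfl
  | succ fuel ih =>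
    intro visited path c hc hck
    have hcg : (c == goal) = false := beq_false_of_ne (fun h => hg (h ▸ hck))
    rw [exploreB, PySem.List.pyGet?_neg_one, hc]
    simp only [hcg, Bool.false_eq_true, if_false]
    by_cases hv : PySem.Set.contains visited c = true
    · rw [hv, if_pos rfl]
    · rw [Bool.not_eq_true] at hv
      rw [hv]
      simp only [Bool.false_eq_true, if_false]
      obtain ⟨ns, hns, hnk⟩ := get?_of_key hck
      rw [hns]
      have haux : ∀ (l : List String), (∀ n ∈ l, n ∈ romaniaKeys) →
          ∀ (v : PySem.Set String),
          (l.foldl (fun acc n =>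
              match acc with
              | (some r, v) => (some r, v)
              | (none, v) => exploreB goal fuel v (path ++ [n])) (none, v)).1 = none := by
        intro l
        induction l with
        | nil => intro _ v; rfl
        | cons n ns ihl =>
          intro hl v
          have h1 : (exploreB goal fuel v (path ++ [n])).1 = none :=
            ih v (path ++ [n]) n List.getLast?_concat (hl n (by simp))
          have hpair : exploreB goal fuel v (path ++ [n]) =
              (none, (exploreB goal fuel v (path ++ [n])).2) := by
            rw [← h1]
          simp only [List.foldl_cons]
          rw [hpair]
          exact ihl (fun m hm => hl m (by simp [hm])) _
      exact haux ns.reverse (fun n hn => hnk n (List.mem_reverse.mp hn)) _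

-- single-character start ≠ goal: start ∈ set(start), nothing is expanded, both return none
theorem singleton_mem_visited {s : String} {c : Char} (h : s.toList = [c]) :
    PySem.Set.contains (PySem.Set.ofList (s.toList.map (fun c => String.singleton c))) s = true := by
  have hs : s = String.singleton c := String.toList_inj.mp (by simp [h])
  rw [h]
  exact (PySem.Set.contains_iff _ _).mpr (by simp [PySem.Set.mem_ofList, hs])

-- start ∈ keys, goal ∈ keys: finitely many concrete runs
theorem pairs_eq : ∀ s ∈ romaniaKeys, ∀ g ∈ romaniaKeys, dfs s g = dfs_alt s g := by decide

-- ===== VERDICT (by name: the statement is the Claim_ definition above) =====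
theorem dfs_spec : Claim_equal_dfs := by
  intro s g _ hpre
  unfold Spec_dfs
  by_cases hsg : s = g
  · subst hsg
    unfold dfs dfs_alt
    rw [show (1000 : Nat) = 999 + 1 from rfl, dfs_self, exploreB_self]
  · rcases hpre with rfl | hk | hlen
    · exact absurd rfl hsg
    · by_cases hgk : g ∈ romaniaKeys
      · exact pairs_eq s hk g hgk
      · unfold dfs dfs_alt
        rw [loopA_none g hgk 1000 _ _ (fun p hp => by
              rw [List.mem_singleton.mp hp]; exact ⟨s, by simp, hk⟩),
            exploreB_none g hgk 1000 _ [s] s (by simp) hk]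
    · obtain ⟨c, hc⟩ := List.length_eq_one_iff.mp hlen
      have hmem := singleton_mem_visited hc
      unfold dfs dfs_alt
      have hbeq : (s == g) = false := beq_false_of_ne hsg
      rw [show (1000 : Nat) = 998 + 2 from rfl, dfs_stuck g s _ _ hbeq hmem,
          show (998 : Nat) + 2 = 999 + 1 from rfl, exploreB_stuck g s _ _ hbeq hmem]
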